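-- pv_equiv track=rewrite | github.com/alexbouayad/google-kickstart | 2022/round-d/touchbar_typing/solution.py | minimal_time
-- ===== SOURCE A (Python) =====
-- def minimal_time(word, keyboard):
--     n_keys = len(keyboard)
--     result = [[0] * len(keyboard) for _ in range(2)]
--
--     for i, key in enumerate(word):
--         key_prev, key_next = [None] * n_keys, [None] * n_keys
--         j_prev, j_next = None, None
--
--         for j in range(n_keys):
--             if keyboard[j] == key:
--                 j_prev = j
--
--             key_prev[j] = j_prev
--
--         for j in reversed(range(n_keys)):
--             if keyboard[j] == key:
--                 j_next = j
--
--             key_next[j] = j_next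
--
--         for j in range(n_keys):
--             times = []
--
--             if key_prev[j] is not None:
--                 j_prev = key_prev[j]
--                 times.append(result[(i + 1) % 2][j_prev] + abs(j - j_prev))
--
--             if key_next[j] is not None:
--                 j_next = key_next[j]
--                 times.append(result[(i + 1) % 2][j_next] + abs(j - j_next))
--
--             result[i % 2][j] = min(times)
--
--     return min(result[i % 2])
-- ===== SOURCE B (Python) =====
-- def minimal_time(word, keyboard):
--     occ = {}
--     for j, c in enumerate(keyboard):
--         occ.setdefault(c, []).append(j)
--     pos = list(range(len(keyboard)))
--     val = [0] * len(keyboard)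
--     for ch in word:
--         new_pos = occ.get(ch, [])
--         new_val = []
--         k = 0
--         for q in new_pos:
--             while k < len(pos) and pos[k] < q:
--                 k += 1
--             cands = []
--             left = k if k < len(pos) and pos[k] == q else k - 1
--             if left >= 0:
--                 cands.append(val[left] + (q - pos[left]))
--             if k < len(pos):
--                 cands.append(val[k] + (pos[k] - q))
--             new_val.append(min(cands))
--         pos, val = new_pos, new_val
--     return min(val)
-- ===== Notes on version B (the rewrite author's own statement) =====
-- stated objective: faster
-- what changed: Replaces A's dense DP (a full keyboard-length row recomputed per character via key_prev/key_next index arrays and a two-row parity buffer) by a sparse DP kept only at the occurrence positions of the current character: a dict of per-character occurrence lists is built once, and each transition is a two-pointer merge of the previous and current occurrence lists.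
-- crash fix: On an empty word with a nonempty keyboard A raises UnboundLocalError (i is unbound at the final return); B returns 0, the time to type nothing. — e.g. on minimal_time("", "a"): A raises UnboundLocalError, B returns 0
import Mathlib
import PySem

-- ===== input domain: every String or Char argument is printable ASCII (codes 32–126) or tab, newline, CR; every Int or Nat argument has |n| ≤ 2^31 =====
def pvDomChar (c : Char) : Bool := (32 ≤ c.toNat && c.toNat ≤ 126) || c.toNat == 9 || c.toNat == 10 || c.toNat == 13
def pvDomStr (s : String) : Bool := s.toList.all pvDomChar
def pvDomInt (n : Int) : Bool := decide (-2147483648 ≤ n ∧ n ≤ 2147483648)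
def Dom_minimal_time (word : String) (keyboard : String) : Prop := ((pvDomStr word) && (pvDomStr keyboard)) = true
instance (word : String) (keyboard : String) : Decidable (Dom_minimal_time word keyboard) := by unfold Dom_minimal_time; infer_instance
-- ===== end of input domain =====

-- B replaces A's dense per-key dynamic programming row (recomputed at every keyboard position for
-- every character) by a sparse DP kept only at the occurrence positions of the current character,
-- looked up in a dict of occurrence lists with a two-pointer merge (objective: faster; the timing
-- run measured B ≥ 7× faster at the largest sizes).

-- ===== PORT A =====
-- left scan: key_prev[j] = nearest matching index ≤ j (None if none yet)
def pvAKeyPrev (kb : List Char) (key : Char) : List (Option Int) :=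
  ((PySem.List.pyRange 0 (kb.length : Int) 1).foldl
    (fun (st : List (Option Int) × Option Int) j =>
      let jp := if PySem.List.pyGetD kb j ' ' = key then some j else st.2
      (st.1 ++ [jp], jp)) ([], none)).1

-- right scan: key_next[j] = nearest matching index ≥ j
def pvAKeyNext (kb : List Char) (key : Char) : List (Option Int) :=
  ((PySem.List.pyRange 0 (kb.length : Int) 1).reverse.foldl
    (fun (st : List (Option Int) × Option Int) j =>
      let jn := if PySem.List.pyGetD kb j ' ' = key then some j else st.2
      (jn :: st.1, jn)) ([], none)).1

-- A's third inner loop: result[i%2][j] = min(times); min([]) (char absent) is excluded by Pre_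
def pvAStep (kb : List Char) (key : Char) (prev : List Int) : List Int :=
  let kp := pvAKeyPrev kb key
  let kn := pvAKeyNext kb key
  (PySem.List.pyRange 0 (kb.length : Int) 1).foldl
    (fun acc j =>
      let times : List Int :=
        (match PySem.List.pyGetD kp j none with
         | some jp => [PySem.List.pyGetD prev jp 0 + |j - jp|]
         | none => []) ++
        (match PySem.List.pyGetD kn j none with
         | some jn => [PySem.List.pyGetD prev jn 0 + |j - jn|]
         | none => [])
      acc ++ [(PySem.List.min? times (fun x => x)).getD 0]) []

def minimal_time (word : String) (keyboard : String) : Int :=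
  let kb := keyboard.toList
  let init : List Int := List.replicate kb.length 0
  let res := (PySem.List.enumerate word.toList 0).foldl
    (fun (r : List Int × List Int) ik =>
      let prevRow := if PySem.Int.mod (ik.1 + 1) 2 = 0 then r.1 else r.2
      let newRow := pvAStep kb ik.2 prevRow
      if PySem.Int.mod ik.1 2 = 0 then (newRow, r.2) else (r.1, newRow))
    (init, init)
  -- empty word raises NameError in Python (excluded by Pre_); the parity pick is (len-1) % 2
  let fin := if PySem.Int.mod ((word.toList.length : Int) - 1) 2 = 0 then res.1 else res.2
  (PySem.List.min? fin (fun x => x)).getD 0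

-- ===== PORT B =====
-- occ = {}; for j, c in enumerate(keyboard): occ.setdefault(c, []).append(j)
def pvOccDict (kb : List Char) : PySem.Dict Char (List Int) :=
  (PySem.List.enumerate kb 0).foldl
    (fun d jc => d.modify jc.2 [] (fun l => l ++ [jc.1])) PySem.Dict.empty

-- while k < len(pos) and pos[k] < q: k += 1   (k is a nonnegative Python int)
def pvAdv (pos : List Int) (q : Int) (k : Nat) : Nat :=
  if h : k < pos.length ∧ pos.getD k 0 < q then pvAdv pos q (k + 1) else k
termination_by pos.length - k
decreasing_by omega

-- one iteration of B's inner loop: the appended value and the updated pointer k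
def pvBVal (pos val : List Int) (q : Int) (k0 : Nat) : Int × Nat :=
  let k := pvAdv pos q k0
  let left : Int := if k < pos.length ∧ pos.getD k 0 == q then (k : Int) else (k : Int) - 1
  let cands : List Int :=
    (if 0 ≤ left then [PySem.List.pyGetD val left 0 + (q - PySem.List.pyGetD pos left 0)] else []) ++
    (if k < pos.length then [val.getD k 0 + (pos.getD k 0 - q)] else [])
  ((PySem.List.min? cands (fun x => x)).getD 0, k)

-- new_val = [] ; k = 0 ; for q in new_pos: … new_val.append(min(cands))
def pvBStep (pos val newPos : List Int) : List Int :=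
  (newPos.foldl (fun (st : List Int × Nat) q =>
      let r := pvBVal pos val q st.2
      (st.1 ++ [r.1], r.2)) (([] : List Int), 0)).1

def minimal_time_alt (word : String) (keyboard : String) : Int :=
  let kb := keyboard.toList
  let occ := pvOccDict kb
  let st := word.toList.foldl
    (fun (st : List Int × List Int) ch =>
      let np := occ.getD ch []
      (np, pvBStep st.1 st.2 np))
    (PySem.List.pyRange 0 (kb.length : Int) 1, List.replicate kb.length 0)
  (PySem.List.min? st.2 (fun x => x)).getD 0

-- ===== PRECONDITION & SPEC =====
-- Pre_ excludes exactly the inputs where Python A raises: an empty word (NameError/UnboundLocalError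
-- at the final return) and a word containing a character absent from the keyboard (ValueError from min([])).
def Pre_minimal_time (word : String) (keyboard : String) : Prop :=
  word.toList ≠ [] ∧ (word.toList.all (fun c => keyboard.toList.contains c)) = true
instance (word : String) (keyboard : String) : Decidable (Pre_minimal_time word keyboard) := by
  unfold Pre_minimal_time; infer_instance
def pvWitness_minimal_time : String × String := ("abba", "bca")

-- On an empty word with a nonempty keyboard A raises UnboundLocalError (i is unbound at the
-- final return); B returns 0, the time to type nothing.
def Raises_minimal_time (word : String) (keyboard : String) : Prop := word = "" ∧ keyboard ≠ ""
instance (word : String) (keyboard : String) : Decidable (Raises_minimal_time word keyboard) := by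
  unfold Raises_minimal_time; infer_instance
def pvRaiseWitness_minimal_time : String × String := ("", "a")
def pvRaiseWitnessOut_minimal_time : Int := 0

def Spec_minimal_time (word : String) (keyboard : String) (out : Int) : Prop := out = minimal_time_alt word keyboard
instance (word : String) (keyboard : String) (out : Int) : Decidable (Spec_minimal_time word keyboard out) := by unfold Spec_minimal_time; infer_instance

-- ===== CLAIM (what is proved, stated in full; the proofs are below) =====
def Claim_equal_minimal_time : Prop := ∀ (word : String) (keyboard : String), Dom_minimal_time word keyboard → Pre_minimal_time word keyboard → Spec_minimal_time word keyboard (minimal_time word keyboard)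
def Claim_raises_minimal_time : Prop := (∀ (word : String) (keyboard : String), Dom_minimal_time word keyboard → Raises_minimal_time word keyboard → ¬ Pre_minimal_time word keyboard) ∧ (Dom_minimal_time (pvRaiseWitness_minimal_time.1) (pvRaiseWitness_minimal_time.2) ∧ Raises_minimal_time (pvRaiseWitness_minimal_time.1) (pvRaiseWitness_minimal_time.2) ∧ minimal_time_alt (pvRaiseWitness_minimal_time.1) (pvRaiseWitness_minimal_time.2) = pvRaiseWitnessOut_minimal_time)

-- ===== LEMMAS AND PROOFS =====

-- occurrence list of a character over the first k keyboard positions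
def pvOccK (kb : List Char) (ch : Char) (k : Nat) : List Int :=
  (PySem.List.pyRange 0 (k : Int) 1).filter (fun j => PySem.List.pyGetD kb j ' ' == ch)

-- full occurrence list (what B's dict stores per character)
def pvOccL (kb : List Char) (ch : Char) : List Int := pvOccK kb ch kb.length

-- last element ≤ q of an increasing list / first element ≥ q
def pvLastLE : List Int → Int → Option Int
  | [], _ => none
  | p :: rest, q => if p ≤ q then some ((pvLastLE rest q).getD p) else none

def pvFirstGE : List Int → Int → Option Int
  | [], _ => none
  | p :: rest, q => if q ≤ p then some p else pvFirstGE rest q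

-- nearest-left / nearest-right candidate value over a (position, value) pair list
def pvCandL : List (Int × Int) → Int → Option Int
  | [], _ => none
  | pv :: rest, q => if pv.1 ≤ q then some ((pvCandL rest q).getD (pv.2 + (q - pv.1))) else none

def pvCandR : List (Int × Int) → Int → Option Int
  | [], _ => none
  | pv :: rest, q => if q ≤ pv.1 then some (pv.2 + (pv.1 - q)) else pvCandR rest q

def pvComb (pvl : List (Int × Int)) (q : Int) : Int :=
  (PySem.List.min? ((pvCandL pvl q).toList ++ (pvCandR pvl q).toList) (fun x => x)).getD 0

def pvPairs (r : List Int) (l : List Int) : List (Int × Int) :=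
  l.map (fun p => (p, PySem.List.pyGetD r p 0))

-- number of leading elements < q  /  ≤ q
def pvCntB (q : Int) : List Int → Nat
  | [] => 0
  | p :: rest => if p < q then pvCntB q rest + 1 else 0

def pvCntLE (q : Int) : List Int → Nat
  | [] => 0
  | p :: rest => if p ≤ q then pvCntLE q rest + 1 else 0

-- ---------- two-pointer lemmas (B side) ----------
lemma pvCntB_le_length (q : Int) (pos : List Int) : pvCntB q pos ≤ pos.length := by
  induction pos with
  | nil => simp [pvCntB]
  | cons p rest ih => simp only [pvCntB, List.length_cons]; split <;> omega

lemma pvCntB_getD_lt (q : Int) (pos : List Int) (i : Nat) (h : i < pvCntB q pos) :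
    pos.getD i 0 < q := by
  induction pos generalizing i with
  | nil => simp [pvCntB] at h
  | cons p rest ih =>
    simp only [pvCntB] at h
    split at h
    · cases i with
      | zero => simpa using ‹p < q›
      | succ i => simpa using ih i (by omega)
    · omega

lemma pvCntB_getD_ge (q : Int) (pos : List Int) (h : pvCntB q pos < pos.length) :
    ¬ pos.getD (pvCntB q pos) 0 < q := by
  induction pos with
  | nil => simp [pvCntB] at h
  | cons p rest ih =>
    simp only [pvCntB, List.length_cons] at h ⊢
    by_cases hpq : p < q
    · rw [if_pos hpq] at h ⊢
      simp only [List.getD_cons_succ]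
      exact ih (by omega)
    · rw [if_neg hpq]
      simpa using hpq

lemma pvCntB_mono (pos : List Int) {q q' : Int} (h : q ≤ q') : pvCntB q pos ≤ pvCntB q' pos := by
  induction pos with
  | nil => simp [pvCntB]
  | cons p rest ih =>
    simp only [pvCntB]
    split
    · rw [if_pos (by omega)]; omega
    · omega

lemma pvAdv_eq (pos : List Int) (q : Int) (k : Nat) (hk : k ≤ pvCntB q pos) :
    pvAdv pos q k = pvCntB q pos := by
  revert hk
  induction k using pvAdv.induct (pos := pos) (q := q) with
  | case1 k h ih =>
    intro hk
    rw [pvAdv, dif_pos h]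
    have hkc : k < pvCntB q pos := by
      rcases Nat.lt_or_ge k (pvCntB q pos) with h1 | h1
      · exact h1
      · have hk' : k = pvCntB q pos := le_antisymm hk h1
        exact absurd h.2 (hk' ▸ pvCntB_getD_ge q pos (hk' ▸ h.1))
    exact ih hkc
  | case2 k h =>
    intro hk
    rw [pvAdv, dif_neg h]
    rcases Nat.lt_or_ge k (pvCntB q pos) with h1 | h1
    · exact absurd ⟨lt_of_lt_of_le h1 (pvCntB_le_length q pos), pvCntB_getD_lt q pos k h1⟩ h
    · omega

lemma pvCandL_eq (q : Int) (pos : List Int) : ∀ (val : List Int), val.length = pos.length →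
    pvCandL (pos.zip val) q =
      if 0 < pvCntLE q pos
      then some (val.getD (pvCntLE q pos - 1) 0 + (q - pos.getD (pvCntLE q pos - 1) 0))
      else none := by
  induction pos with
  | nil => intro val h; simp [pvCandL, pvCntLE]
  | cons p ps ih =>
    intro val h
    rcases val with _ | ⟨v, vs⟩
    · simp at h
    · simp only [List.length_cons] at h
      by_cases hpq : p ≤ q
      · have hLE : pvCntLE q (p :: ps) = pvCntLE q ps + 1 := by
          simp only [pvCntLE, if_pos hpq]
        rw [hLE, List.zip_cons_cons]
        simp only [pvCandL]
        rw [if_pos hpq, if_pos (by omega : 0 < pvCntLE q ps + 1), ih vs (by omega)]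
        rcases Nat.eq_zero_or_pos (pvCntLE q ps) with h0 | h0
        · rw [h0, if_neg (by omega)]
          simp
        · rw [if_pos h0]
          have he : pvCntLE q ps + 1 - 1 = (pvCntLE q ps - 1) + 1 := by omega
          rw [he]
          simp
      · have hLE : pvCntLE q (p :: ps) = 0 := by
          simp only [pvCntLE, if_neg hpq]
        rw [hLE, List.zip_cons_cons]
        simp only [pvCandL]
        rw [if_neg hpq, if_neg (by omega)]

lemma pvCandR_eq (q : Int) (pos : List Int) : ∀ (val : List Int), val.length = pos.length →
    pvCandR (pos.zip val) q =
      if pvCntB q pos < pos.length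
      then some (val.getD (pvCntB q pos) 0 + (pos.getD (pvCntB q pos) 0 - q))
      else none := by
  induction pos with
  | nil => intro val h; simp [pvCandR, pvCntB]
  | cons p ps ih =>
    intro val h
    rcases val with _ | ⟨v, vs⟩
    · simp at h
    · simp only [List.length_cons] at h
      by_cases hpq : p < q
      · have hB : pvCntB q (p :: ps) = pvCntB q ps + 1 := by
          simp only [pvCntB, if_pos hpq]
        rw [hB, List.zip_cons_cons]
        simp only [pvCandR]
        rw [if_neg (by omega), ih vs (by omega)]
        simp only [List.length_cons]
        by_cases h2 : pvCntB q ps < ps.length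
        · rw [if_pos h2, if_pos (by omega)]; simp
        · rw [if_neg h2, if_neg (by omega)]
      · have hB : pvCntB q (p :: ps) = 0 := by
          simp only [pvCntB, if_neg hpq]
        rw [hB, List.zip_cons_cons]
        simp only [pvCandR]
        rw [if_pos (by omega), if_pos (by simp only [List.length_cons]; omega)]
        simp

lemma pvCntLE_cntB (q : Int) (pos : List Int) (hs : pos.Pairwise (· < ·)) :
    pvCntLE q pos =
      if pvCntB q pos < pos.length ∧ pos.getD (pvCntB q pos) 0 = q
      then pvCntB q pos + 1 else pvCntB q pos := by
  induction pos with
  | nil => simp [pvCntLE, pvCntB]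
  | cons p ps ih =>
    simp only [pvCntLE, pvCntB, List.length_cons]
    rcases List.pairwise_cons.mp hs with ⟨hhead, htail⟩
    by_cases hpq : p < q
    · rw [if_pos (le_of_lt hpq), if_pos hpq, ih htail]
      by_cases h2 : pvCntB q ps < ps.length ∧ ps.getD (pvCntB q ps) 0 = q
      · rw [if_pos h2, if_pos (by simpa using h2)]
      · rw [if_neg h2, if_neg (by simpa using h2)]
    · have h0 : (if p < q then pvCntB q ps + 1 else 0) = 0 := if_neg hpq
      rw [h0]
      by_cases heq : p = q
      · rw [if_pos (le_of_eq heq), if_pos (by simp; omega)]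
        have hz : pvCntLE q ps = 0 := by
          cases ps with
          | nil => simp [pvCntLE]
          | cons x xs =>
            have hx : p < x := hhead x (by simp)
            simp only [pvCntLE]
            rw [if_neg (by omega)]
        omega
      · rw [if_neg (by omega), if_neg (by simp only [List.getD_cons_zero]; omega)]

lemma pvBVal_eq (pos val : List Int) (q : Int) (k : Nat)
    (hlen : val.length = pos.length) (hs : pos.Pairwise (· < ·)) (hk : k ≤ pvCntB q pos) :
    pvBVal pos val q k = (pvComb (pos.zip val) q, pvCntB q pos) := by
  have hadv := pvAdv_eq pos q k hk
  have hR : (if pvAdv pos q k < pos.length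
        then [val.getD (pvAdv pos q k) 0 + (pos.getD (pvAdv pos q k) 0 - q)] else ([] : List Int))
      = (pvCandR (pos.zip val) q).toList := by
    rw [hadv, pvCandR_eq q pos val hlen]
    split
    · simp
    · simp
  have hL : (if (0:Int) ≤ (if pvAdv pos q k < pos.length ∧ pos.getD (pvAdv pos q k) 0 == q
          then ((pvAdv pos q k : Nat) : Int) else ((pvAdv pos q k : Nat) : Int) - 1)
        then [PySem.List.pyGetD val (if pvAdv pos q k < pos.length ∧ pos.getD (pvAdv pos q k) 0 == q
                then ((pvAdv pos q k : Nat) : Int) else ((pvAdv pos q k : Nat) : Int) - 1) 0 +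
              (q - PySem.List.pyGetD pos (if pvAdv pos q k < pos.length ∧ pos.getD (pvAdv pos q k) 0 == q
                then ((pvAdv pos q k : Nat) : Int) else ((pvAdv pos q k : Nat) : Int) - 1) 0)]
        else ([] : List Int))
      = (pvCandL (pos.zip val) q).toList := by
    rw [hadv, pvCandL_eq q pos val hlen, pvCntLE_cntB q pos hs]
    simp only [beq_iff_eq]
    by_cases hc : pvCntB q pos < pos.length ∧ pos.getD (pvCntB q pos) 0 = q
    · rw [if_pos hc, if_pos hc, if_pos (Int.natCast_nonneg _),
        if_pos (by omega : 0 < pvCntB q pos + 1)]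
      simp [PySem.List.pyGetD_natCast]
    · rw [if_neg hc, if_neg hc]
      rcases Nat.eq_zero_or_pos (pvCntB q pos) with h0 | h0
      · rw [h0]
        simp
      · rw [if_pos (by omega : (0:Int) ≤ ((pvCntB q pos : Nat) : Int) - 1), if_pos h0,
          show ((pvCntB q pos : Nat) : Int) - 1 = ((pvCntB q pos - 1 : Nat) : Int) by omega,
          PySem.List.pyGetD_natCast, PySem.List.pyGetD_natCast]
        simp
  simp only [pvBVal]
  rw [hL, hR, hadv]
  rfl

lemma pvBStep_eq (pos val : List Int) (hlen : val.length = pos.length)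
    (hs : pos.Pairwise (· < ·)) (newPos : List Int) (hnp : newPos.Pairwise (· ≤ ·)) :
    pvBStep pos val newPos = newPos.map (fun q => pvComb (pos.zip val) q) := by
  suffices h : ∀ (newPos : List Int) (acc : List Int) (k : Nat),
      newPos.Pairwise (· ≤ ·) → (∀ q ∈ newPos, k ≤ pvCntB q pos) →
      (newPos.foldl (fun (st : List Int × Nat) q =>
          let r := pvBVal pos val q st.2
          (st.1 ++ [r.1], r.2)) (acc, k)).1
        = acc ++ newPos.map (fun q => pvComb (pos.zip val) q) by
    exact h newPos [] 0 hnp (fun q _ => Nat.zero_le _)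
  intro newPos
  induction newPos with
  | nil => intro acc k _ _; simp
  | cons q rest ih =>
    intro acc k hp hkk
    rcases List.pairwise_cons.mp hp with ⟨hhead, htail⟩
    rw [List.foldl_cons]
    simp only []
    rw [pvBVal_eq pos val q k hlen hs (hkk q (by simp))]
    rw [ih (acc ++ [pvComb (pos.zip val) q]) (pvCntB q pos) htail
      (fun q' hq' => pvCntB_mono pos (hhead q' hq'))]
    simp

-- ---------- dict lemma (B side) ----------
lemma pvOccDict_getD (kb : List Char) (ch : Char) :
    (pvOccDict kb).getD ch [] = pvOccL kb ch := by
  unfold pvOccDict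
  have hmap : (PySem.List.enumerate kb 0).foldl
      (fun d jc => d.modify jc.2 [] (fun l => l ++ [jc.1])) PySem.Dict.empty
      = (((PySem.List.enumerate kb 0).map (fun jc => (jc.2, jc.1))).foldl
          (fun d p => d.modify p.1 [] (fun l => l ++ [p.2])) PySem.Dict.empty) := by
    rw [List.foldl_map]
  rw [hmap, PySem.Dict.getD_foldl_modify_append, PySem.Dict.getD_empty, List.nil_append]
  rw [PySem.List.enumerate_eq_map_pyRange kb ' ', List.map_map, List.filter_map, List.map_map]
  unfold pvOccL pvOccK
  simp [Function.comp_def]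

-- ---------- occurrence-list structure ----------
lemma pvOccK_succ (kb : List Char) (ch : Char) (k : Nat) :
    pvOccK kb ch (k + 1) =
      pvOccK kb ch k ++ (if PySem.List.pyGetD kb (k : Int) ' ' == ch then [(k : Int)] else []) := by
  unfold pvOccK
  have hc : ((k + 1 : Nat) : Int) = (k : Int) + 1 := by push_cast; ring
  rw [hc, PySem.List.pyRange_one_succ_right (by positivity), List.filter_append]
  congr 1
  split <;> simp_all

lemma pvMem_occK (kb : List Char) (ch : Char) (k : Nat) {x : Int} (hx : x ∈ pvOccK kb ch k) :
    0 ≤ x ∧ x < (k : Int) := by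
  unfold pvOccK at hx
  have := List.mem_filter.mp hx
  have hm := (PySem.List.mem_pyRange_one).mp this.1
  exact hm

lemma pvOccK_split (kb : List Char) (ch : Char) {k m : Nat} (h : k ≤ m) :
    ∃ t, pvOccK kb ch m = pvOccK kb ch k ++ t ∧ ∀ x ∈ t, (k : Int) ≤ x := by
  refine ⟨(PySem.List.pyRange (k : Int) (m : Int) 1).filter
      (fun j => PySem.List.pyGetD kb j ' ' == ch), ?_, ?_⟩
  · unfold pvOccK
    rw [PySem.List.pyRange_one_append 0 (k : Int) (m : Int) (by positivity) (by exact_mod_cast h),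
      List.filter_append]
  · intro x hx
    exact ((PySem.List.mem_pyRange_one).mp (List.mem_filter.mp hx).1).1

lemma pvOccK_sorted (kb : List Char) (ch : Char) (k : Nat) :
    (pvOccK kb ch k).Pairwise (· < ·) := by
  exact (PySem.List.pairwise_lt_pyRange_one 0 (k : Int) ).filter _

-- ---------- A-side scan characterisations ----------
-- carry of A's left scan after processing indices 0..k-1
def pvLpc (kb : List Char) (key : Char) : Nat → Option Int
  | 0 => none
  | k+1 => if PySem.List.pyGetD kb (k : Int) ' ' = key then some (k : Int) else pvLpc kb key k

-- emission list of a right-to-left scan over indices k-1..0 entered with carry c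
def pvEmitR (kb : List Char) (key : Char) : Nat → Option Int → List (Option Int)
  | 0, _ => []
  | k+1, c =>
    (pvEmitR kb key k (if PySem.List.pyGetD kb (k : Int) ' ' = key then some (k : Int) else c))
      ++ [if PySem.List.pyGetD kb (k : Int) ' ' = key then some (k : Int) else c]

lemma pvALeft_fold (kb : List Char) (key : Char) (k : Nat) :
    (PySem.List.pyRange 0 (k : Int) 1).foldl
      (fun (st : List (Option Int) × Option Int) j =>
        let jp := if PySem.List.pyGetD kb j ' ' = key then some j else st.2
        (st.1 ++ [jp], jp)) ([], none)
      = ((List.range k).map (fun j => pvLpc kb key (j+1)), pvLpc kb key k) := by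
  induction k with
  | zero => simp [PySem.List.pyRange_one_eq_nil, pvLpc]
  | succ k ih =>
    have hc : ((k + 1 : Nat) : Int) = (k : Int) + 1 := by push_cast; ring
    rw [hc, PySem.List.pyRange_one_succ_right (by positivity), List.foldl_append, ih]
    simp only [List.foldl_cons, List.foldl_nil, List.range_succ, List.map_append, List.map_cons,
      List.map_nil, pvLpc]

lemma pvAKeyPrev_getD (kb : List Char) (key : Char) (j : Nat) (hj : j < kb.length) :
    PySem.List.pyGetD (pvAKeyPrev kb key) (j : Int) none = pvLpc kb key (j+1) := by
  unfold pvAKeyPrev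
  rw [pvALeft_fold, PySem.List.pyGetD_natCast]
  rw [List.getD_eq_getElem _ _ (by simpa using hj)]
  simp

lemma pvARight_fold (kb : List Char) (key : Char) :
    ∀ (k : Nat) (acc : List (Option Int)) (c : Option Int),
    ((PySem.List.pyRange 0 (k : Int) 1).reverse.foldl
      (fun (st : List (Option Int) × Option Int) j =>
        let jn := if PySem.List.pyGetD kb j ' ' = key then some j else st.2
        (jn :: st.1, jn)) (acc, c)).1 = pvEmitR kb key k c ++ acc := by
  intro k
  induction k with
  | zero => intro acc c; simp [PySem.List.pyRange_one_eq_nil, pvEmitR]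
  | succ k ih =>
    intro acc c
    have hc : ((k + 1 : Nat) : Int) = (k : Int) + 1 := by push_cast; ring
    rw [hc, PySem.List.pyRange_one_succ_right (by positivity), List.reverse_append,
      List.reverse_singleton, List.singleton_append, List.foldl_cons]
    simp only []
    rw [ih]
    simp [pvEmitR, List.append_assoc]

lemma pvEmitR_length (kb : List Char) (key : Char) :
    ∀ k c, (pvEmitR kb key k c).length = k := by
  intro k
  induction k with
  | zero => intro c; simp [pvEmitR]
  | succ k ih => intro c; simp [pvEmitR, ih]

lemma pvAKeyNext_eq (kb : List Char) (key : Char) :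
    pvAKeyNext kb key = pvEmitR kb key kb.length none := by
  unfold pvAKeyNext
  rw [pvARight_fold]
  simp

-- pvLpc is the last element of the occurrence prefix
lemma pvLpc_eq_getLast (kb : List Char) (ch : Char) (k : Nat) :
    pvLpc kb ch k = (pvOccK kb ch k).getLast? := by
  induction k with
  | zero =>
    simp [pvLpc, pvOccK, PySem.List.pyRange_one_eq_nil]
  | succ k ih =>
    rw [pvOccK_succ]
    simp only [pvLpc]
    by_cases h : PySem.List.pyGetD kb (k : Int) ' ' = ch
    · rw [if_pos h, if_pos (beq_iff_eq.mpr h), List.getLast?_concat]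
    · rw [if_neg h, if_neg (by simpa using h), List.append_nil, ih]

lemma pvLastLE_append_of_gt {l t : List Int} {q : Int} (ht : ∀ x ∈ t, q < x) :
    pvLastLE (l ++ t) q = pvLastLE l q := by
  induction l with
  | nil =>
    cases t with
    | nil => rfl
    | cons p ts =>
      simp only [List.nil_append, pvLastLE]
      rw [if_neg (by
        have := ht p (by simp)
        omega)]
  | cons p l ih =>
    simp only [List.cons_append, pvLastLE, ih]

lemma pvLastLE_all_le {l : List Int} {q : Int} (h : ∀ x ∈ l, x ≤ q) :
    pvLastLE l q = l.getLast? := by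
  induction l with
  | nil => rfl
  | cons p l ih =>
    simp only [pvLastLE]
    rw [if_pos (h p (by simp)), ih (fun x hx => h x (by simp [hx]))]
    cases l with
    | nil => rfl
    | cons x xs =>
      rw [List.getLast?_cons_cons]
      rcases hg : (x :: xs).getLast? with _ | g
      · exact absurd hg (by simp [List.getLast?_eq_none_iff])
      · rfl

lemma pvKeyPrev_occ (kb : List Char) (ch : Char) (j : Nat) (hj : j < kb.length) :
    pvLpc kb ch (j + 1) = pvLastLE (pvOccL kb ch) (j : Int) := by
  unfold pvOccL
  obtain ⟨t, hsplit, ht⟩ := pvOccK_split kb ch (show j + 1 ≤ kb.length by omega)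
  rw [hsplit, pvLastLE_append_of_gt (fun x hx => by
      have := ht x hx
      push_cast at this ⊢
      omega),
    pvLastLE_all_le (fun x hx => by
      have := pvMem_occK kb ch (j+1) hx
      push_cast at this ⊢
      omega),
    pvLpc_eq_getLast]

lemma pvFirstGE_append (l t : List Int) (q : Int) :
    pvFirstGE (l ++ t) q = (pvFirstGE l q).or (pvFirstGE t q) := by
  induction l with
  | nil => simp [pvFirstGE]
  | cons p l ih =>
    simp only [List.cons_append, pvFirstGE]
    split
    · rfl
    · exact ih

lemma pvFirstGE_none_of_lt {l : List Int} {q : Int} (h : ∀ x ∈ l, x < q) :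
    pvFirstGE l q = none := by
  induction l with
  | nil => rfl
  | cons p l ih =>
    simp only [pvFirstGE]
    rw [if_neg (by
      have := h p (by simp)
      omega)]
    exact ih (fun x hx => h x (by simp [hx]))

lemma pvEmitR_getD_eq (kb : List Char) (ch : Char) :
    ∀ (k : Nat) (c : Option Int) (j : Nat), j < k →
    (pvEmitR kb ch k c).getD j none = (pvFirstGE (pvOccK kb ch k) (j : Int)).or c := by
  intro k
  induction k with
  | zero => intro c j hj; omega
  | succ k ih =>
    intro c j hj
    simp only [pvEmitR]
    have hocc : pvOccK kb ch (k+1) = pvOccK kb ch k ++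
        (if PySem.List.pyGetD kb (k : Int) ' ' == ch then [(k : Int)] else []) := pvOccK_succ kb ch k
    rcases Nat.lt_or_ge j k with hlt | hge
    · rw [List.getD_append _ _ _ j (by rw [pvEmitR_length]; exact hlt), ih _ j hlt, hocc,
        pvFirstGE_append]
      have htail : pvFirstGE (if PySem.List.pyGetD kb (k : Int) ' ' == ch
            then [(k : Int)] else []) (j : Int)
          = (if PySem.List.pyGetD kb (k : Int) ' ' = ch then some (k : Int) else none) := by
        by_cases h : PySem.List.pyGetD kb (k : Int) ' ' = ch
        · rw [if_pos (beq_iff_eq.mpr h), if_pos h]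
          simp only [pvFirstGE]
          rw [if_pos (by omega)]
        · rw [if_neg (by simpa using h), if_neg h]
          rfl
      rw [htail, Option.or_assoc]
      congr 1
      by_cases h : PySem.List.pyGetD kb (k : Int) ' ' = ch
      · rw [if_pos h, if_pos h]
        rfl
      · rw [if_neg h, if_neg h]
        rfl
    · have hjk : j = k := by omega
      subst hjk
      rw [List.getD_append_right _ _ _ _ (by rw [pvEmitR_length]), pvEmitR_length]
      simp only [Nat.sub_self, List.getD_cons_zero]
      rw [hocc, pvFirstGE_append,
        pvFirstGE_none_of_lt (fun x hx => (pvMem_occK kb ch j hx).2), Option.none_or]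
      by_cases h : PySem.List.pyGetD kb (j : Int) ' ' = ch
      · rw [if_pos (beq_iff_eq.mpr h), if_pos h]
        simp only [pvFirstGE]
        rw [if_pos le_rfl]
        rfl
      · rw [if_neg (by simpa using h), if_neg (by simpa using h)]
        rfl

lemma pvKeyNext_occ (kb : List Char) (ch : Char) (j : Nat) (hj : j < kb.length) :
    PySem.List.pyGetD (pvAKeyNext kb ch) (j : Int) none = pvFirstGE (pvOccL kb ch) (j : Int) := by
  rw [pvAKeyNext_eq, PySem.List.pyGetD_natCast,
    pvEmitR_getD_eq kb ch kb.length none j hj, Option.or_none]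
  rfl

-- ---------- candidate lemmas ----------
lemma pvLastLE_some {l : List Int} {q p : Int} (h : pvLastLE l q = some p) : p ≤ q ∧ p ∈ l := by
  suffices hgen : ∀ p', pvLastLE l q = some p' → p' ≤ q ∧ p' ∈ l from hgen p h
  clear h
  induction l with
  | nil => intro p' h; simp [pvLastLE] at h
  | cons p0 l ih =>
    intro p' h
    simp only [pvLastLE] at h
    by_cases hle : p0 ≤ q
    · rw [if_pos hle] at h
      rcases hl : pvLastLE l q with _ | g
      · rw [hl] at h
        simp only [Option.getD_none, Option.some.injEq] at h
        exact ⟨h ▸ hle, h ▸ List.mem_cons_self⟩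
      · rw [hl] at h
        simp only [Option.getD_some, Option.some.injEq] at h
        obtain ⟨h1, h2⟩ := ih g hl
        exact ⟨h ▸ h1, h ▸ List.mem_cons_of_mem _ h2⟩
    · rw [if_neg hle] at h
      simp at h

lemma pvFirstGE_some {l : List Int} {q p : Int} (h : pvFirstGE l q = some p) : q ≤ p ∧ p ∈ l := by
  induction l with
  | nil => simp [pvFirstGE] at h
  | cons p0 l ih =>
    simp only [pvFirstGE] at h
    by_cases hge : q ≤ p0
    · rw [if_pos hge] at h
      simp only [Option.some.injEq] at h
      exact ⟨h ▸ hge, h ▸ List.mem_cons_self⟩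
    · rw [if_neg hge] at h
      obtain ⟨h1, h2⟩ := ih h
      exact ⟨h1, List.mem_cons_of_mem _ h2⟩

lemma pvCandL_pairs (r : List Int) (l : List Int) (q : Int) :
    pvCandL (pvPairs r l) q = (pvLastLE l q).map (fun p => PySem.List.pyGetD r p 0 + (q - p)) := by
  induction l with
  | nil => rfl
  | cons p0 l ih =>
    simp only [pvPairs, List.map_cons, pvCandL, pvLastLE]
    by_cases hle : p0 ≤ q
    · rw [if_pos hle, if_pos hle]
      unfold pvPairs at ih
      rw [ih]
      rcases pvLastLE l q with _ | g
      · simp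
      · simp
    · rw [if_neg hle, if_neg hle]
      rfl

lemma pvCandR_pairs (r : List Int) (l : List Int) (q : Int) :
    pvCandR (pvPairs r l) q = (pvFirstGE l q).map (fun p => PySem.List.pyGetD r p 0 + (p - q)) := by
  induction l with
  | nil => rfl
  | cons p0 l ih =>
    simp only [pvPairs, List.map_cons, pvCandR, pvFirstGE]
    by_cases hge : q ≤ p0
    · rw [if_pos hge, if_pos hge]
      rfl
    · rw [if_neg hge, if_neg hge]
      unfold pvPairs at ih
      exact ih

lemma pvCandL_mem {pvl : List (Int × Int)} {q x : Int} (h : pvCandL pvl q = some x) :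
    ∃ pr ∈ pvl, x = pr.2 + (q - pr.1) ∧ pr.1 ≤ q := by
  suffices hgen : ∀ x', pvCandL pvl q = some x' → ∃ pr ∈ pvl, x' = pr.2 + (q - pr.1) ∧ pr.1 ≤ q
    from hgen x h
  clear h
  induction pvl with
  | nil => intro x' h; simp [pvCandL] at h
  | cons pv rest ih =>
    intro x' h
    simp only [pvCandL] at h
    by_cases hle : pv.1 ≤ q
    · rw [if_pos hle] at h
      rcases hl : pvCandL rest q with _ | y
      · rw [hl] at h
        simp only [Option.getD_none, Option.some.injEq] at h
        exact ⟨pv, List.mem_cons_self, h.symm, hle⟩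
      · rw [hl] at h
        simp only [Option.getD_some, Option.some.injEq] at h
        obtain ⟨pr, hm, he, hq⟩ := ih y hl
        exact ⟨pr, List.mem_cons_of_mem _ hm, h ▸ he, hq⟩
    · rw [if_neg hle] at h
      simp at h

lemma pvCandR_mem {pvl : List (Int × Int)} {q x : Int} (h : pvCandR pvl q = some x) :
    ∃ pr ∈ pvl, x = pr.2 + (pr.1 - q) ∧ q ≤ pr.1 := by
  suffices hgen : ∀ x', pvCandR pvl q = some x' → ∃ pr ∈ pvl, x' = pr.2 + (pr.1 - q) ∧ q ≤ pr.1
    from hgen x h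
  clear h
  induction pvl with
  | nil => intro x' h; simp [pvCandR] at h
  | cons pv rest ih =>
    intro x' h
    simp only [pvCandR] at h
    by_cases hge : q ≤ pv.1
    · rw [if_pos hge] at h
      simp only [Option.some.injEq] at h
      exact ⟨pv, List.mem_cons_self, h.symm, hge⟩
    · rw [if_neg hge] at h
      obtain ⟨pr, hm, he, hq⟩ := ih x' h
      exact ⟨pr, List.mem_cons_of_mem _ hm, he, hq⟩

lemma pvCandL_self {pvl : List (Int × Int)} {q v : Int}
    (hs : (pvl.map Prod.fst).Pairwise (· < ·)) (hmem : (q, v) ∈ pvl) :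
    pvCandL pvl q = some v := by
  induction pvl with
  | nil => simp at hmem
  | cons pv rest ih =>
    simp only [List.map_cons, List.pairwise_cons] at hs
    obtain ⟨hhead, htail⟩ := hs
    rcases List.mem_cons.mp hmem with heq | hmem'
    · rw [← heq]
      simp only [pvCandL]
      rw [if_pos le_rfl]
      have hnone : pvCandL rest q = none := by
        cases rest with
        | nil => rfl
        | cons pv2 rs =>
          have h2 : q < pv2.1 := by
            have := hhead pv2.1 (by simp)
            rw [← heq] at this
            exact this
          simp only [pvCandL]
          rw [if_neg (by omega)]
      rw [hnone]
      simp
    · have hq : pv.1 < q := hhead q (List.mem_map.mpr ⟨(q, v), hmem', rfl⟩)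
      simp only [pvCandL]
      rw [if_pos (le_of_lt hq), ih htail hmem']
      simp

lemma pvCandR_self {pvl : List (Int × Int)} {q v : Int}
    (hs : (pvl.map Prod.fst).Pairwise (· < ·)) (hmem : (q, v) ∈ pvl) :
    pvCandR pvl q = some v := by
  induction pvl with
  | nil => simp at hmem
  | cons pv rest ih =>
    simp only [List.map_cons, List.pairwise_cons] at hs
    obtain ⟨hhead, htail⟩ := hs
    rcases List.mem_cons.mp hmem with heq | hmem'
    · rw [← heq]
      simp only [pvCandR]
      rw [if_pos le_rfl]
      simp
    · have hq : pv.1 < q := hhead q (List.mem_map.mpr ⟨(q, v), hmem', rfl⟩)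
      simp only [pvCandR]
      rw [if_neg (by omega)]
      exact ih htail hmem'

lemma pvComb_self {pvl : List (Int × Int)} {q v : Int}
    (hs : (pvl.map Prod.fst).Pairwise (· < ·)) (hmem : (q, v) ∈ pvl) :
    pvComb pvl q = v := by
  unfold pvComb
  rw [pvCandL_self hs hmem, pvCandR_self hs hmem]
  simp [PySem.List.min?_id_cons]

lemma pvComb_ge {pvl : List (Int × Int)} (hne : pvl ≠ []) (q : Int) :
    ∃ pr ∈ pvl, pr.2 ≤ pvComb pvl q := by
  rcases pvl with _ | ⟨pv, rest⟩
  · exact absurd rfl hne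
  · have hlist : (pvCandL (pv :: rest) q).toList ++ (pvCandR (pv :: rest) q).toList ≠ [] := by
      by_cases hle : pv.1 ≤ q
      · have : pvCandL (pv :: rest) q =
            some ((pvCandL rest q).getD (pv.2 + (q - pv.1))) := by
          simp only [pvCandL]
          rw [if_pos hle]
        simp [this]
      · have : pvCandR (pv :: rest) q = some (pv.2 + (pv.1 - q)) := by
          simp only [pvCandR]
          rw [if_pos (by omega)]
        simp [this]
    rcases hmin : PySem.List.min?
        ((pvCandL (pv :: rest) q).toList ++ (pvCandR (pv :: rest) q).toList) (fun x => x)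
      with _ | m
    · exfalso
      rcases hl0 : (pvCandL (pv :: rest) q).toList ++ (pvCandR (pv :: rest) q).toList with _ | ⟨a, t⟩
      · exact hlist hl0
      · rw [hl0, PySem.List.min?_id_cons] at hmin
        simp at hmin
    · have hcomb : pvComb (pv :: rest) q = m := by
        unfold pvComb
        rw [hmin]
        rfl
      have hm := PySem.List.min?_mem hmin
      rcases List.mem_append.mp hm with hml | hmr
      · have : pvCandL (pv :: rest) q = some m := by
          rcases hcl : pvCandL (pv :: rest) q with _ | y
          · rw [hcl] at hml
            simp at hml
          · rw [hcl] at hml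
            simp only [Option.toList_some, List.mem_singleton] at hml
            rw [hml]
        obtain ⟨pr, hmem, he, hq⟩ := pvCandL_mem this
        exact ⟨pr, hmem, by rw [hcomb, he]; omega⟩
      · have : pvCandR (pv :: rest) q = some m := by
          rcases hcl : pvCandR (pv :: rest) q with _ | y
          · rw [hcl] at hmr
            simp at hmr
          · rw [hcl] at hmr
            simp only [Option.toList_some, List.mem_singleton] at hmr
            rw [hmr]
        obtain ⟨pr, hmem, he, hq⟩ := pvCandR_mem this
        exact ⟨pr, hmem, by rw [hcomb, he]; omega⟩

-- ---------- A's step as a map of pvComb ----------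
lemma pvAStep_eq (kb : List Char) (ch : Char) (r : List Int) :
    pvAStep kb ch r =
      (PySem.List.pyRange 0 (kb.length : Int) 1).map
        (fun j => pvComb (pvPairs r (pvOccL kb ch)) j) := by
  simp only [pvAStep]
  rw [PySem.List.foldl_append_singleton_eq_map]
  rw [List.nil_append]
  apply List.map_congr_left
  intro j hj
  obtain ⟨h0, hn⟩ := PySem.List.mem_pyRange_one.mp hj
  set jn := j.toNat with hjn
  have hcast : (jn : Int) = j := Int.toNat_of_nonneg h0
  have hjlt : jn < kb.length := by omega
  rw [← hcast, pvAKeyPrev_getD kb ch jn hjlt, pvKeyPrev_occ kb ch jn hjlt,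
    pvKeyNext_occ kb ch jn hjlt]
  have hL : (match pvLastLE (pvOccL kb ch) (jn : Int) with
      | some jp => [PySem.List.pyGetD r jp 0 + |(jn : Int) - jp|]
      | none => ([] : List Int)) = (pvCandL (pvPairs r (pvOccL kb ch)) (jn : Int)).toList := by
    rw [pvCandL_pairs]
    rcases hl : pvLastLE (pvOccL kb ch) (jn : Int) with _ | p
    · rfl
    · have hple := (pvLastLE_some hl).1
      simp [abs_of_nonneg (by omega : (0:Int) ≤ (jn : Int) - p)]
  have hR : (match pvFirstGE (pvOccL kb ch) (jn : Int) with
      | some jp => [PySem.List.pyGetD r jp 0 + |(jn : Int) - jp|]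
      | none => ([] : List Int)) = (pvCandR (pvPairs r (pvOccL kb ch)) (jn : Int)).toList := by
    rw [pvCandR_pairs]
    rcases hl : pvFirstGE (pvOccL kb ch) (jn : Int) with _ | p
    · rfl
    · have hple := (pvFirstGE_some hl).1
      have habs : |(jn : Int) - p| = p - (jn : Int) := by
        rw [abs_of_nonpos (by omega)]
        ring
      simp [habs]
  rw [hL, hR]
  rfl

lemma pvZip_map_self (l : List Int) (f : Int → Int) :
    l.zip (l.map f) = l.map (fun x => (x, f x)) := by
  induction l with
  | nil => rfl
  | cons x t ih => simp [ih]

-- ---------- main invariant ----------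
lemma pvMain_inv (kb : List Char) :
    ∀ (cs : List Char) (r pos val : List Int),
      (∀ c ∈ cs, c ∈ kb) →
      r.length = kb.length →
      pos.Pairwise (· < ·) →
      (∀ p ∈ pos, 0 ≤ p ∧ p < (kb.length : Int)) →
      val = pos.map (fun p => PySem.List.pyGetD r p 0) →
      (∀ jn : Nat, jn < kb.length → r.getD jn 0 = pvComb (pos.zip val) (jn : Int)) →
      pos ≠ [] →
      (let r' := cs.foldl (fun r ch => pvAStep kb ch r) r
       let st := cs.foldl (fun (st : List Int × List Int) ch =>
           let np := (pvOccDict kb).getD ch []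
           (np, pvBStep st.1 st.2 np)) (pos, val)
       r'.length = kb.length ∧ st.1.Pairwise (· < ·) ∧
         (∀ p ∈ st.1, 0 ≤ p ∧ p < (kb.length : Int)) ∧
         st.2 = st.1.map (fun p => PySem.List.pyGetD r' p 0) ∧
         (∀ jn : Nat, jn < kb.length → r'.getD jn 0 = pvComb (st.1.zip st.2) (jn : Int)) ∧
         st.1 ≠ []) := by
  intro cs
  induction cs with
  | nil =>
    intro r pos val hcs hr hsort hbnd hval hcomb hne
    exact ⟨hr, hsort, hbnd, hval, hcomb, hne⟩
  | cons c cs ih =>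
    intro r pos val hcs hr hsort hbnd hval hcomb hne
    simp only [List.foldl_cons]
    have hnp : (pvOccDict kb).getD c [] = pvOccL kb c := pvOccDict_getD kb c
    have hoccsort : (pvOccL kb c).Pairwise (· < ·) := pvOccK_sorted kb c kb.length
    have hoccbnd : ∀ p ∈ pvOccL kb c, 0 ≤ p ∧ p < (kb.length : Int) :=
      fun p hp => pvMem_occK kb c kb.length hp
    have hvallen : val.length = pos.length := by rw [hval]; simp
    have hstep : pvBStep pos val (pvOccL kb c)
        = (pvOccL kb c).map (fun q => pvComb (pos.zip val) q) :=
      pvBStep_eq pos val hvallen hsort (pvOccL kb c) (hoccsort.imp le_of_lt)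
    have hmapr : (pvOccL kb c).map (fun q => pvComb (pos.zip val) q)
        = (pvOccL kb c).map (fun p => PySem.List.pyGetD r p 0) := by
      apply List.map_congr_left
      intro q hq
      obtain ⟨hq0, hqn⟩ := hoccbnd q hq
      have hqc : ((q.toNat : Nat) : Int) = q := Int.toNat_of_nonneg hq0
      rw [← hqc, PySem.List.pyGetD_natCast, hcomb q.toNat (by omega)]
    have hr' := pvAStep_eq kb c r
    have hzip : (pvOccL kb c).zip ((pvOccL kb c).map (fun p => PySem.List.pyGetD r p 0))
        = pvPairs r (pvOccL kb c) := by
      unfold pvPairs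
      exact pvZip_map_self _ _
    have hpairsfst : ((pvPairs r (pvOccL kb c)).map Prod.fst).Pairwise (· < ·) := by
      unfold pvPairs
      rw [List.map_map,
        show (Prod.fst ∘ fun p : Int => (p, PySem.List.pyGetD r p 0)) = fun p : Int => p from rfl,
        List.map_id']
      exact hoccsort
    have hget : ∀ jn : Nat, jn < kb.length →
        (pvAStep kb c r).getD jn 0 = pvComb (pvPairs r (pvOccL kb c)) (jn : Int) := by
      intro jn hjn
      rw [← PySem.List.pyGetD_natCast, hr',
        PySem.List.pyGetD_map_pyRange_of_nonneg _ _ _ _ (by positivity) (by exact_mod_cast hjn)]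
    have hvr' : (pvOccL kb c).map (fun p => PySem.List.pyGetD r p 0)
        = (pvOccL kb c).map (fun p => PySem.List.pyGetD (pvAStep kb c r) p 0) := by
      apply List.map_congr_left
      intro p hp
      obtain ⟨hp0, hpn⟩ := hoccbnd p hp
      have hpc : ((p.toNat : Nat) : Int) = p := Int.toNat_of_nonneg hp0
      have hgA : PySem.List.pyGetD r ((p.toNat : Nat) : Int) 0 = r.getD p.toNat 0 := by
        rw [PySem.List.pyGetD_natCast]
      have hgB : PySem.List.pyGetD (pvAStep kb c r) ((p.toNat : Nat) : Int) 0
          = (pvAStep kb c r).getD p.toNat 0 := by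
        rw [PySem.List.pyGetD_natCast]
      rw [hpc] at hgA hgB
      rw [hgA, hgB, hget p.toNat (by omega), hpc]
      symm
      refine pvComb_self hpairsfst ?_
      unfold pvPairs
      exact List.mem_map.mpr ⟨p, hp, by rw [← hgA]⟩
    have hnewlen : (pvAStep kb c r).length = kb.length := by
      rw [hr', List.length_map, PySem.List.length_pyRange_one]
      omega
    have hoccne : pvOccL kb c ≠ [] := by
      have hc : c ∈ kb := hcs c (by simp)
      obtain ⟨jn, hjn, hcj⟩ := List.getElem_of_mem hc
      apply List.ne_nil_of_mem (a := (jn : Int))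
      unfold pvOccL pvOccK
      rw [List.mem_filter]
      constructor
      · exact PySem.List.mem_pyRange_one.mpr ⟨by positivity, by exact_mod_cast hjn⟩
      · rw [PySem.List.pyGetD_natCast, List.getD_eq_getElem _ _ hjn, hcj]
        simp
    rw [hnp, hstep, hmapr, hvr']
    apply ih
    · exact fun c' hc' => hcs c' (by simp [hc'])
    · exact hnewlen
    · exact hoccsort
    · exact hoccbnd
    · rfl
    · intro jn hjn
      rw [hget jn hjn, ← hvr', hzip]
    · exact hoccne

-- ---------- final min equality ----------
lemma pvMin_eq (r pos val : List Int) (n : Nat)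
    (hr : r.length = n) (hn : 0 < n)
    (hbnd : ∀ p ∈ pos, 0 ≤ p ∧ p < (n : Int))
    (hv : val = pos.map (fun p => PySem.List.pyGetD r p 0))
    (hcomb : ∀ jn : Nat, jn < n → r.getD jn 0 = pvComb (pos.zip val) (jn : Int))
    (hne : pos ≠ []) :
    (PySem.List.min? r (fun x => x)).getD 0 = (PySem.List.min? val (fun x => x)).getD 0 := by
  have hrne : r ≠ [] := by
    intro h
    rw [h] at hr
    simp at hr
    omega
  have hvne : val ≠ [] := by
    rw [hv]
    intro h
    exact hne (List.map_eq_nil_iff.mp h)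
  obtain ⟨a, ha⟩ : ∃ a, PySem.List.min? r (fun x => x) = some a := by
    rcases r with _ | ⟨x, t⟩
    · exact absurd rfl hrne
    · exact ⟨_, PySem.List.min?_id_cons x t⟩
  obtain ⟨b, hb⟩ : ∃ b, PySem.List.min? val (fun x => x) = some b := by
    rcases hvv : val with _ | ⟨x, t⟩
    · exact absurd hvv hvne
    · exact ⟨_, PySem.List.min?_id_cons x t⟩
  rw [ha, hb]
  simp only [Option.getD_some]
  apply le_antisymm
  · have hbmem := PySem.List.min?_mem hb
    rw [hv] at hbmem
    obtain ⟨p, hp, hpb⟩ := List.mem_map.mp hbmem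
    obtain ⟨hp0, hpn⟩ := hbnd p hp
    have hbr : b ∈ r := by
      rw [← hpb, ← Int.toNat_of_nonneg hp0, PySem.List.pyGetD_natCast]
      have hlt : p.toNat < r.length := by omega
      rw [List.getD_eq_getElem r 0 hlt]
      exact List.getElem_mem hlt
    exact PySem.List.min?_isMin ha b hbr
  · have hamem := PySem.List.min?_mem ha
    obtain ⟨jn, hjn, hja⟩ := List.getElem_of_mem hamem
    have hag : r.getD jn 0 = a := by
      rw [List.getD_eq_getElem r 0 hjn, hja]
    have hcj := hcomb jn (by omega)
    rw [hag] at hcj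
    have hzne : pos.zip val ≠ [] := by
      rcases hpp : pos with _ | ⟨p, pt⟩
      · exact absurd hpp hne
      · rw [hv, hpp]
        simp
    obtain ⟨pr, hpr, hle⟩ := pvComb_ge hzne (jn : Int)
    rw [← hcj] at hle
    have hprv : pr.2 ∈ val := (List.of_mem_zip hpr).2
    exact le_trans (PySem.List.min?_isMin hb pr.2 hprv) hle

-- ---------- A's two-row buffer collapses to a plain fold ----------
lemma pvOuter_inv (kb : List Char) :
    ∀ (cs : List Char) (i : Int) (r0 r1 cur : List Int), 0 ≤ i →
    (if PySem.Int.mod (i + 1) 2 = 0 then r0 else r1) = cur →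
    (if PySem.Int.mod (i + (cs.length : Int) + 1) 2 = 0
     then ((PySem.List.enumerate cs i).foldl
        (fun (r : List Int × List Int) ik =>
          let prevRow := if PySem.Int.mod (ik.1 + 1) 2 = 0 then r.1 else r.2
          let newRow := pvAStep kb ik.2 prevRow
          if PySem.Int.mod ik.1 2 = 0 then (newRow, r.2) else (r.1, newRow)) (r0, r1)).1
     else ((PySem.List.enumerate cs i).foldl
        (fun (r : List Int × List Int) ik =>
          let prevRow := if PySem.Int.mod (ik.1 + 1) 2 = 0 then r.1 else r.2
          let newRow := pvAStep kb ik.2 prevRow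
          if PySem.Int.mod ik.1 2 = 0 then (newRow, r.2) else (r.1, newRow)) (r0, r1)).2)
    = cs.foldl (fun c ch => pvAStep kb ch c) cur := by
  intro cs
  induction cs with
  | nil =>
    intro i r0 r1 cur hi hcur
    simpa using hcur
  | cons c cs ih =>
    intro i r0 r1 cur hi hcur
    rw [PySem.List.enumerate_cons, List.foldl_cons]
    dsimp only
    rw [hcur]
    have hidx : i + ((c :: cs).length : Int) + 1 = (i + 1) + (cs.length : Int) + 1 := by
      push_cast [List.length_cons]; ring
    rw [hidx, List.foldl_cons]
    have hmod : ∀ a : Int, PySem.Int.mod a 2 = a % 2 :=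
      fun a => PySem.Int.mod_eq_emod_of_pos (by norm_num)
    rcases Int.emod_two_eq i with hpar | hpar
    · rw [if_pos (show PySem.Int.mod i 2 = 0 by rw [hmod]; omega)]
      exact ih (i + 1) (pvAStep kb c cur) r1 (pvAStep kb c cur) (by omega)
        (by rw [if_pos (show PySem.Int.mod (i + 1 + 1) 2 = 0 by rw [hmod]; omega)])
    · rw [if_neg (show ¬ PySem.Int.mod i 2 = 0 by rw [hmod]; omega)]
      exact ih (i + 1) r0 (pvAStep kb c cur) (pvAStep kb c cur) (by omega)
        (by rw [if_neg (show ¬ PySem.Int.mod (i + 1 + 1) 2 = 0 by rw [hmod]; omega)])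

-- ===== VERDICT (by name: the statement is the Claim_ definition above) =====
theorem minimal_time_spec : Claim_equal_minimal_time := by
  unfold Claim_equal_minimal_time
  intro word keyboard _ hpre
  obtain ⟨hwne, hall⟩ := hpre
  unfold Spec_minimal_time minimal_time minimal_time_alt
  dsimp only
  rcases hw : word.toList with _ | ⟨c, cs⟩
  · exact absurd hw hwne
  · have hckb : ∀ x ∈ c :: cs, x ∈ keyboard.toList := by
      intro x hx
      have := List.all_eq_true.mp hall x (hw ▸ hx)
      simpa using this
    have hn : 0 < keyboard.toList.length :=
      List.length_pos_of_mem (hckb c (by simp))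
    -- A's two-row buffer collapses to a plain fold of pvAStep
    have hout := pvOuter_inv keyboard.toList (c :: cs) 0
      (List.replicate keyboard.toList.length 0) (List.replicate keyboard.toList.length 0)
      (List.replicate keyboard.toList.length 0) le_rfl (by split <;> rfl)
    simp only [zero_add] at hout
    have hiff : (PySem.Int.mod (((c :: cs).length : Int) - 1) 2 = 0)
        ↔ (PySem.Int.mod (((c :: cs).length : Int) + 1) 2 = 0) := by
      rw [PySem.Int.mod_eq_emod_of_pos (by norm_num), PySem.Int.mod_eq_emod_of_pos (by norm_num)]
      omega
    rw [if_congr hiff rfl rfl, hout]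
    -- initial invariant for the main induction
    have hr0 : (List.replicate keyboard.toList.length (0 : Int)).length = keyboard.toList.length := by
      simp
    have hsort0 : (PySem.List.pyRange 0 (keyboard.toList.length : Int) 1).Pairwise (· < ·) :=
      PySem.List.pairwise_lt_pyRange_one 0 _
    have hbnd0 : ∀ p ∈ PySem.List.pyRange 0 (keyboard.toList.length : Int) 1,
        0 ≤ p ∧ p < (keyboard.toList.length : Int) :=
      fun p hp => PySem.List.mem_pyRange_one.mp hp
    have hlen0 : (PySem.List.pyRange 0 (keyboard.toList.length : Int) 1).length
        = keyboard.toList.length := by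
      rw [PySem.List.length_pyRange_one]
      omega
    have hget0 : ∀ p ∈ PySem.List.pyRange 0 (keyboard.toList.length : Int) 1,
        PySem.List.pyGetD (List.replicate keyboard.toList.length (0 : Int)) p 0 = 0 := by
      intro p hp
      obtain ⟨hp0, hpn⟩ := hbnd0 p hp
      have hpc : ((p.toNat : Nat) : Int) = p := Int.toNat_of_nonneg hp0
      rw [← hpc, PySem.List.pyGetD_natCast]
      rw [List.getD_eq_getElem _ _ (by simp only [List.length_replicate]; omega)]
      simp
    have hval0 : List.replicate keyboard.toList.length (0 : Int)
        = (PySem.List.pyRange 0 (keyboard.toList.length : Int) 1).map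
            (fun p => PySem.List.pyGetD (List.replicate keyboard.toList.length (0 : Int)) p 0) := by
      symm
      rw [List.map_congr_left hget0, List.map_const', hlen0]
    have hzip0 : (PySem.List.pyRange 0 (keyboard.toList.length : Int) 1).zip
          (List.replicate keyboard.toList.length (0 : Int))
        = (PySem.List.pyRange 0 (keyboard.toList.length : Int) 1).map
            (fun x => (x, PySem.List.pyGetD (List.replicate keyboard.toList.length (0 : Int)) x 0)) := by
      conv_lhs => rw [hval0]
      exact pvZip_map_self _ _
    have hcomb0 : ∀ jn : Nat, jn < keyboard.toList.length →
        (List.replicate keyboard.toList.length (0 : Int)).getD jn 0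
          = pvComb ((PySem.List.pyRange 0 (keyboard.toList.length : Int) 1).zip
              (List.replicate keyboard.toList.length (0 : Int))) (jn : Int) := by
      intro jn hjn
      have hlhs : (List.replicate keyboard.toList.length (0 : Int)).getD jn 0 = 0 := by
        rw [List.getD_eq_getElem _ _ (by simp only [List.length_replicate]; omega)]
        simp
      rw [hlhs, hzip0]
      symm
      have hjr : ((jn : Nat) : Int) ∈ PySem.List.pyRange 0 (keyboard.toList.length : Int) 1 :=
        PySem.List.mem_pyRange_one.mpr ⟨by positivity, by exact_mod_cast hjn⟩
      have hfst : (((PySem.List.pyRange 0 (keyboard.toList.length : Int) 1).map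
            (fun x => (x, PySem.List.pyGetD (List.replicate keyboard.toList.length (0 : Int)) x 0))).map
            Prod.fst).Pairwise (· < ·) := by
        rw [List.map_map,
          show (Prod.fst ∘ fun x : Int =>
              (x, PySem.List.pyGetD (List.replicate keyboard.toList.length (0 : Int)) x 0))
            = fun x : Int => x from rfl,
          List.map_id']
        exact hsort0
      rw [pvComb_self hfst (List.mem_map.mpr ⟨(jn : Int), hjr, rfl⟩)]
      exact hget0 _ hjr
    have hne0 : PySem.List.pyRange 0 (keyboard.toList.length : Int) 1 ≠ [] := by
      intro h
      have h0 : keyboard.toList.length = 0 := by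
        rw [← hlen0, h]
        rfl
      omega
    have hmain := pvMain_inv keyboard.toList (c :: cs)
      (List.replicate keyboard.toList.length 0)
      (PySem.List.pyRange 0 (keyboard.toList.length : Int) 1)
      (List.replicate keyboard.toList.length 0)
      hckb hr0 hsort0 hbnd0 hval0 hcomb0 hne0
    obtain ⟨hA1, hB2, hB3, hB4, hB5, hB6⟩ := hmain
    exact pvMin_eq _ _ _ keyboard.toList.length hA1 hn hB3 hB4 hB5 hB6

theorem minimal_time_raises : Claim_raises_minimal_time := by
  unfold Claim_raises_minimal_time
  constructor
  · rintro word keyboard _ ⟨hw, _⟩ ⟨hne, _⟩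
    subst hw
    exact hne rfl
  · exact ⟨by decide, by decide, by decide⟩

-- self-check that the raise-witness value stated above is the one B's port computes
theorem pvRaiseWitnessOut_ok :
    minimal_time_alt (pvRaiseWitness_minimal_time.1) (pvRaiseWitness_minimal_time.2)
      = pvRaiseWitnessOut_minimal_time := by
  have h := minimal_time_raises
  unfold Claim_raises_minimal_time at h
  exact h.2.2.2
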